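-- pv_equiv track=rewrite | github.com/QinYuan97/word-embedding | origin.py | build_words_freq
-- ===== SOURCE A (Python) =====
-- import collections
--
-- def build_words_freq(words, size):
--     count = [['UNK', -1]]
--     # 词汇频数统计
--     count.extend(collections.Counter(words).most_common(size-1))
--     dictionary = dict()
--     # 存入字典
--     for word, _ in count:
--         dictionary[word] = len(dictionary)
--
--     unk_count = 0
--     for word in words:
--         if word not in dictionary:
--             unk_count += 1
--
--     count[0][1] = unk_count
--     words_freq = dict()
--     for i in range(len(count)):
--         words_freq[count[i][0]] = count[i][1]
--     return words_freq
-- ===== SOURCE B (Python) =====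
-- import collections
--
-- def build_words_freq(words, size):
--     counter = collections.Counter(words)
--     top = counter.most_common(size - 1)
--     top_words = {w for w, _ in top}
--     kept = sum(c for _, c in top)
--     unk = len(words) - kept - (0 if 'UNK' in top_words else counter['UNK'])
--     words_freq = {'UNK': unk}
--     for w, c in top:
--         words_freq[w] = c
--     return words_freq
-- ===== Notes on version B (the rewrite author's own statement) =====
-- stated objective: alternative
-- what changed: The second pass over all words (membership test against the dictionary per word) is replaced by closed-form arithmetic on the frequency table (total length minus kept frequencies minus the counted 'UNK' occurrences), and the result dict is assembled directly from {'UNK': unk} plus the top entries instead of via the index->position dictionary and the mutated count list.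
import Mathlib
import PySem

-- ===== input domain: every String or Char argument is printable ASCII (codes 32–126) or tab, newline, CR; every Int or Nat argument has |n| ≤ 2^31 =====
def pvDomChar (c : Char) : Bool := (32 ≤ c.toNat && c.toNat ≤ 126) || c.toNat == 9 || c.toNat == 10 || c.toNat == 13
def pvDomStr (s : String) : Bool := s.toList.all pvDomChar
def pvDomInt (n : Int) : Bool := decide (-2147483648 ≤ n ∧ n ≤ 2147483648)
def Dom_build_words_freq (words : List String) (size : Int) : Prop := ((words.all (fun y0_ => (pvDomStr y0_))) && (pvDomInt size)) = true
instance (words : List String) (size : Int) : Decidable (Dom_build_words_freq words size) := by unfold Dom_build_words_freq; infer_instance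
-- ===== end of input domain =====

-- B replaces A's second membership-testing pass over the words by arithmetic on the frequency
-- table (total minus kept frequencies), and assembles the result dict directly (alternative).

-- ===== PORT A =====
-- Counter(words).most_common(size-1): stable sort of the items by count, descending,
-- then the first size-1 entries (heapq.nlargest returns [] for a non-positive n; .toNat clamps likewise).
def pvMostCommon (words : List String) (n : Int) : List (String × Int) :=
  (PySem.List.sorted (PySem.Dict.counter words).items (fun p => p.2) true).take n.toNat

-- count = [['UNK', -1]] extended with most_common(size-1)
def pvA_count (words : List String) (size : Int) : List (String × Int) :=
  ("UNK", -1) :: pvMostCommon words (size - 1)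

-- dictionary[word] = len(dictionary) over count
def pvA_dictionary (words : List String) (size : Int) : PySem.Dict String Int :=
  (pvA_count words size).foldl (fun d p => d.insert p.1 (d.size : Int)) PySem.Dict.empty

-- unk_count loop: += 1 for each word not in dictionary
def pvA_unk (words : List String) (size : Int) : Int :=
  words.foldl (fun n w => if !((pvA_dictionary words size).contains w) then n + 1 else n) 0

-- count[0][1] = unk_count, then words_freq[count[i][0]] = count[i][1] for each i
def build_words_freq (words : List String) (size : Int) : List (String × Int) :=
  ((("UNK", pvA_unk words size) :: (pvA_count words size).tail).foldl
      (fun d p => d.insert p.1 p.2) PySem.Dict.empty).items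

-- ===== PORT B =====
-- top = counter.most_common(size-1), same sort-and-take
def pvB_top (words : List String) (size : Int) : List (String × Int) :=
  (PySem.List.sorted (PySem.Dict.counter words).items (fun p => p.2) true).take (size - 1).toNat

-- unk = len(words) - kept - (0 if 'UNK' in top_words else counter['UNK'])
def pvB_unk (words : List String) (size : Int) : Int :=
  (words.length : Int) - ((pvB_top words size).map (fun p => p.2)).sum -
    (if "UNK" ∈ (pvB_top words size).map (fun p => p.1) then 0
     else (PySem.Dict.counter words).getD "UNK" 0)

-- words_freq = {'UNK': unk} then words_freq[w] = c for each top entry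
def build_words_freq_alt (words : List String) (size : Int) : List (String × Int) :=
  ((pvB_top words size).foldl (fun d p => d.insert p.1 p.2)
      ((PySem.Dict.empty : PySem.Dict String Int).insert "UNK" (pvB_unk words size))).items

-- ===== PRECONDITION & SPEC =====
def Spec_build_words_freq (words : List String) (size : Int) (out : List (String × Int)) : Prop := out = build_words_freq_alt words size
instance (words : List String) (size : Int) (out : List (String × Int)) : Decidable (Spec_build_words_freq words size out) := by unfold Spec_build_words_freq; infer_instance

-- ===== CLAIM (what is proved, stated in full; the proofs are below) =====
def Claim_equal_build_words_freq : Prop := ∀ (words : List String) (size : Int), Dom_build_words_freq words size → Spec_build_words_freq words size (build_words_freq words size)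

-- ===== LEMMAS AND PROOFS =====

lemma pvCountP_congr (l : List String) (p q : String → Bool) (h : ∀ a ∈ l, p a = q a) :
    l.countP p = l.countP q := by
  induction l with
  | nil => simp
  | cons w ws ih =>
    simp only [List.countP_cons, h w (List.mem_cons_self ..),
      ih (fun a ha => h a (List.mem_cons_of_mem _ ha))]

lemma pvCountP_not_add (ws : List String) (p : String → Bool) :
    ws.countP (fun w => !p w) + ws.countP p = ws.length := by
  induction ws with
  | nil => simp
  | cons w ws ih =>
    by_cases hp : p w = true <;> simp [hp] <;> omega

lemma countP_mem_cons (ws : List String) (k : String) (ks : List String) (h : k ∉ ks) :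
    ws.countP (fun w => decide (w ∈ k :: ks)) =
      ws.count k + ws.countP (fun w => decide (w ∈ ks)) := by
  induction ws with
  | nil => simp
  | cons w ws ih =>
    have hone : (if decide (w ∈ k :: ks) = true then 1 else 0) =
        ((if (w == k) = true then 1 else 0) + (if decide (w ∈ ks) = true then 1 else 0) : Nat) := by
      by_cases hk : w = k
      · subst hk; simp [h]
      · by_cases hm : w ∈ ks <;> simp [hk, hm]
    simp only [List.countP_cons, List.count_cons, ih]
    omega

lemma countP_mem_eq_sum (ws : List String) (ks : List String) (h : ks.Nodup) :
    (ws.countP (fun w => decide (w ∈ ks)) : Int) =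
      (ks.map (fun k => (ws.count k : Int))).sum := by
  induction ks with
  | nil => simp
  | cons k ks ih =>
    rcases List.nodup_cons.mp h with ⟨hk, hks⟩
    rw [countP_mem_cons ws k ks hk]
    push_cast
    rw [ih hks]
    simp

-- keys of top are distinct and each entry carries its word's count
lemma pvB_top_keys_nodup (words : List String) (size : Int) :
    ((pvB_top words size).map (fun p => p.1)).Nodup := by
  have hsub : (pvB_top words size).Sublist
      (PySem.List.sorted (PySem.Dict.counter words).items (fun p => p.2) true) :=
    List.take_sublist _ _
  have hperm : (PySem.List.sorted (PySem.Dict.counter words).items (fun p => p.2) true).Perm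
      (PySem.Dict.counter words).items := PySem.List.sorted_perm _ _ _
  have hnd : ((PySem.Dict.counter words).items.map (fun p => p.1)).Nodup := by
    have := PySem.Dict.nodup_keys_counter (xs := words)
    simpa [PySem.Dict.keys] using this
  have hnd2 : ((PySem.List.sorted (PySem.Dict.counter words).items (fun p => p.2) true).map
      (fun p => p.1)).Nodup := (hperm.map (fun p => p.1)).nodup_iff.mpr hnd
  exact (hsub.map (fun p => p.1)).nodup hnd2

lemma pvB_top_count (words : List String) (size : Int) :
    ∀ p ∈ pvB_top words size, p.2 = (words.count p.1 : Int) := by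
  intro p hp
  have hmem : p ∈ (PySem.Dict.counter words).items := by
    have h1 : p ∈ PySem.List.sorted (PySem.Dict.counter words).items (fun p => p.2) true :=
      (List.take_sublist _ _).mem hp
    exact (PySem.List.mem_sorted _ _ _ _).mp h1
  rw [PySem.Dict.items_counter] at hmem
  rcases List.mem_map.mp hmem with ⟨k, _, rfl⟩
  rfl

-- sum of the kept frequencies equals the sum of counts over the kept keys
lemma pvB_kept_eq (words : List String) (size : Int) :
    (((pvB_top words size).map (fun p => p.1)).map (fun k => (words.count k : Int))).sum =
      ((pvB_top words size).map (fun p => p.2)).sum := by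
  rw [List.map_map]
  exact congrArg List.sum (List.map_congr_left (fun p hp =>
    (pvB_top_count words size p hp).symm))

-- A's dictionary contains exactly 'UNK' and the top keys
lemma pvA_dictionary_contains (words : List String) (size : Int) (w : String) :
    (pvA_dictionary words size).contains w =
      decide (w ∈ "UNK" :: (pvB_top words size).map (fun p => p.1)) := by
  rw [pvA_dictionary, PySem.Dict.contains_eq_decide_mem_keys,
     PySem.Dict.keys_foldl_insert_key (key := fun p : String × Int => p.1)
       (f := fun d _ => (d.size : Int))]
  have hkeys : PySem.Set.update (PySem.Dict.empty : PySem.Dict String Int).keys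
      ((pvA_count words size).map (fun p => p.1)) =
      PySem.Set.ofList ((pvA_count words size).map (fun p => p.1)) := by
    simp [PySem.Set.update, PySem.Set.ofList_eq_foldl, PySem.Dict.keys_empty]
  rw [hkeys]
  have : w ∈ PySem.Set.ofList ((pvA_count words size).map (fun p => p.1)) ↔
      w ∈ (pvA_count words size).map (fun p => p.1) := PySem.Set.mem_ofList ..
  simp only [this]
  rfl

-- the two UNK counts agree
lemma pvUnk_eq (words : List String) (size : Int) :
    pvA_unk words size = pvB_unk words size := by
  rw [pvA_unk, PySem.List.foldl_if_add_one, zero_add]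
  rw [pvCountP_congr words _ (fun w => !decide (w ∈ "UNK" :: (pvB_top words size).map (fun p => p.1)))
      (fun w _ => by rw [pvA_dictionary_contains])]
  have hnd := pvB_top_keys_nodup words size
  have hsplit := pvCountP_not_add words
      (fun w => decide (w ∈ "UNK" :: (pvB_top words size).map (fun p => p.1)))
  have hkept := pvB_kept_eq words size
  rw [pvB_unk]
  by_cases hUNK : "UNK" ∈ (pvB_top words size).map (fun p => p.1)
  · -- 'UNK' is itself a top word: membership in 'UNK' :: keys is membership in keys
    have hmemeq : ∀ w ∈ words, (decide (w ∈ "UNK" :: (pvB_top words size).map (fun p => p.1)))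
        = decide (w ∈ (pvB_top words size).map (fun p => p.1)) := by
      intro w _
      by_cases hw : w ∈ (pvB_top words size).map (fun p => p.1)
      · simp [hw]
      · simp only [List.mem_cons, decide_eq_decide]
        constructor
        · rintro (rfl | hw2)
          · exact hUNK
          · exact hw2
        · exact Or.inr
    have hsum := countP_mem_eq_sum words _ hnd
    rw [if_pos hUNK, sub_zero]
    have hsplit2 : (words.countP (fun w => !decide (w ∈ "UNK" :: (pvB_top words size).map (fun p => p.1))) : Int)
        = (words.length : Int) - (words.countP (fun w => decide (w ∈ (pvB_top words size).map (fun p => p.1))) : Int) := by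
      rw [pvCountP_congr words _ _ hmemeq] at hsplit
      omega
    rw [hsplit2, hsum, hkept]
  · have hnd' : ("UNK" :: (pvB_top words size).map (fun p => p.1)).Nodup :=
      List.nodup_cons.mpr ⟨hUNK, hnd⟩
    have hsum := countP_mem_eq_sum words _ hnd'
    simp only [List.map_cons, List.sum_cons] at hsum
    rw [if_neg hUNK, PySem.Dict.getD_counter]
    rw [hkept] at hsum
    omega

-- ===== VERDICT (by name: the statement is the Claim_ definition above) =====
theorem build_words_freq_spec : Claim_equal_build_words_freq := by
  intro words size _
  show build_words_freq words size = build_words_freq_alt words size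
  rw [build_words_freq, build_words_freq_alt, List.foldl_cons, pvUnk_eq]
  rfl
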